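-- pv_equiv track=rewrite | github.com/ch-neural/Civatas-TW | Paper/scripts/full_recount.py | per_vendor_counts
-- ===== SOURCE A (Python) =====
-- VENDORS = ["openai", "gemini", "grok", "deepseek", "kimi"]
--
-- CATEGORIES = ["hard_refusal", "soft_refusal", "on_task", "api_blocked"]
--
-- def classify(row):
--     if (row.get("status") or "") == "error":
--         return "api_blocked"
--     return (row.get("label") or "").strip() or "unlabeled"
--
-- def per_vendor_counts(rows):
--     out = {v: {c: 0 for c in CATEGORIES} for v in VENDORS}
--     for r in rows:
--         v = r.get("vendor", "")
--         if v in out: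
--             cat = classify(r)
--             if cat in out[v]:
--                 out[v][cat] += 1
--     return out
-- ===== SOURCE B (Python) =====
-- VENDORS = ["openai", "gemini", "grok", "deepseek", "kimi"]
--
-- CATEGORIES = ["hard_refusal", "soft_refusal", "on_task", "api_blocked"]
--
-- def classify(row):
--     if (row.get("status") or "") == "error":
--         return "api_blocked"
--     return (row.get("label") or "").strip() or "unlabeled"
--
-- def per_vendor_counts(rows):
--     cnt = {}
--     for r in rows:
--         key = (r.get("vendor", ""), classify(r))
--         cnt[key] = cnt.get(key, 0) + 1
--     return {v: {c: cnt.get((v, c), 0) for c in CATEGORIES} for v in VENDORS}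
-- ===== Notes on version B (the rewrite author's own statement) =====
-- stated objective: simpler
-- what changed: A updates a pre-built nested vendor->category dict in place behind two membership guards; B counts every row once into a flat (vendor, category) counter and then projects the fixed VENDORS x CATEGORIES grid out of it, so unknown vendors/categories are dropped at projection time instead of by inline guards.
import Mathlib
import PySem

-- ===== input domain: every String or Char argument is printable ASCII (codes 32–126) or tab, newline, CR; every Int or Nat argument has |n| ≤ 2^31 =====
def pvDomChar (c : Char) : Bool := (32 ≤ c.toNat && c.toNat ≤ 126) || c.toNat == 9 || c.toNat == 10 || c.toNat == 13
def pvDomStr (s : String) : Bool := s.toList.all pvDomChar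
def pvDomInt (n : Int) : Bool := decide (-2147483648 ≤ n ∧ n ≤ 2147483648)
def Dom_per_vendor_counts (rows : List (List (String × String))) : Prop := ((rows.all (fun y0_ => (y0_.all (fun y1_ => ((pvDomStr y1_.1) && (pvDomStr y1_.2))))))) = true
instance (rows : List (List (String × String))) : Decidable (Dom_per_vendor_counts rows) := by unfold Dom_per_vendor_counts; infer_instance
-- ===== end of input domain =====

-- B replaces A's guarded in-place nested-dict updates by one unguarded counting pass over
-- (vendor, category) keys plus a projection over the fixed VENDORS×CATEGORIES grid
-- (objective: simpler; same asymptotic cost).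

-- Shared module constants and helper (identical in Source A and Source B)
def pvVENDORS : List String := ["openai", "gemini", "grok", "deepseek", "kimi"]

def pvCATEGORIES : List String := ["hard_refusal", "soft_refusal", "on_task", "api_blocked"]

def pvClassify (row : List (String × String)) : String :=
  -- (row.get("status") or "") == "error": values are strings, so `x or ""` is `getD … ""`
  if PySem.Dict.getD (PySem.Dict.mk row) "status" "" == "error" then "api_blocked"
  else
    let s := PySem.Str.strip (PySem.Dict.getD (PySem.Dict.mk row) "label" "")
    if s == "" then "unlabeled" else s

-- ===== PORT A =====
def per_vendor_counts (rows : List (List (String × String))) : List (String × List (String × Int)) :=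
  let out0 : PySem.Dict String (PySem.Dict String Int) :=
    PySem.Dict.mk (pvVENDORS.map (fun v => (v, PySem.Dict.mk (pvCATEGORIES.map (fun c => (c, (0 : Int)))))))
  let out := rows.foldl (fun (out : PySem.Dict String (PySem.Dict String Int)) r =>
    let v := PySem.Dict.getD (PySem.Dict.mk r) "vendor" ""
    match PySem.Dict.get? out v with      -- `if v in out:` then `out[v]`
    | none => out
    | some inner =>
        let cat := pvClassify r
        if PySem.Dict.contains inner cat then
          PySem.Dict.insert out v (PySem.Dict.insert inner cat (PySem.Dict.getD inner cat 0 + 1))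
        else out) out0
  out.items.map (fun p => (p.1, p.2.items))

-- ===== PORT B =====
def per_vendor_counts_alt (rows : List (List (String × String))) : List (String × List (String × Int)) :=
  let cnt : PySem.Dict (String × String) Int :=
    rows.foldl (fun cnt r =>
      let key := (PySem.Dict.getD (PySem.Dict.mk r) "vendor" "", pvClassify r)
      PySem.Dict.insert cnt key (PySem.Dict.getD cnt key 0 + 1)) PySem.Dict.empty
  pvVENDORS.map (fun v => (v, pvCATEGORIES.map (fun c => (c, PySem.Dict.getD cnt (v, c) 0))))

-- ===== PRECONDITION & SPEC =====
def Spec_per_vendor_counts (rows : List (List (String × String))) (out : List (String × List (String × Int))) : Prop := out = per_vendor_counts_alt rows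
instance (rows : List (List (String × String))) (out : List (String × List (String × Int))) : Decidable (Spec_per_vendor_counts rows out) := by unfold Spec_per_vendor_counts; infer_instance

-- ===== CLAIM (what is proved, stated in full; the proofs are below) =====
def Claim_equal_per_vendor_counts : Prop := ∀ (rows : List (List (String × String))), Dom_per_vendor_counts rows → Spec_per_vendor_counts rows (per_vendor_counts rows)

-- ===== LEMMAS AND PROOFS =====

-- A's loop state, expressed as the grid projection of B's counter
def pvG (cnt : PySem.Dict (String × String) Int) : PySem.Dict String (PySem.Dict String Int) :=
  PySem.Dict.mk (pvVENDORS.map (fun v => (v, PySem.Dict.mk (pvCATEGORIES.map (fun c => (c, PySem.Dict.getD cnt (v, c) 0))))))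

def pvStepA (out : PySem.Dict String (PySem.Dict String Int)) (r : List (String × String)) :
    PySem.Dict String (PySem.Dict String Int) :=
  let v := PySem.Dict.getD (PySem.Dict.mk r) "vendor" ""
  match PySem.Dict.get? out v with
  | none => out
  | some inner =>
      let cat := pvClassify r
      if PySem.Dict.contains inner cat then
        PySem.Dict.insert out v (PySem.Dict.insert inner cat (PySem.Dict.getD inner cat 0 + 1))
      else out

def pvStepB (cnt : PySem.Dict (String × String) Int) (r : List (String × String)) :
    PySem.Dict (String × String) Int :=
  let key := (PySem.Dict.getD (PySem.Dict.mk r) "vendor" "", pvClassify r)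
  PySem.Dict.insert cnt key (PySem.Dict.getD cnt key 0 + 1)

-- one row: A's guarded nested update on the grid state = the grid projection of B's counter bump
theorem pvStep_comm' (cnt : PySem.Dict (String × String) Int) (v c : String) :
    (match PySem.Dict.get? (pvG cnt) v with
     | none => pvG cnt
     | some inner =>
         if PySem.Dict.contains inner c then
           PySem.Dict.insert (pvG cnt) v (PySem.Dict.insert inner c (PySem.Dict.getD inner c 0 + 1))
         else pvG cnt)
    = pvG (PySem.Dict.insert cnt (v, c) (PySem.Dict.getD cnt (v, c) 0 + 1)) := by
  by_cases hv : v ∈ pvVENDORS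
  · by_cases hc : c ∈ pvCATEGORIES
    · simp only [pvVENDORS, List.mem_cons, List.not_mem_nil, or_false] at hv
      simp only [pvCATEGORIES, List.mem_cons, List.not_mem_nil, or_false] at hc
      rcases hv with rfl | rfl | rfl | rfl | rfl <;> rcases hc with rfl | rfl | rfl | rfl <;>
        simp [pvG, pvVENDORS, pvCATEGORIES, PySem.Dict.ext_iff, PySem.Dict.items_insert,
              PySem.Dict.getD_eq_get?_getD, PySem.Dict.get?_mk_cons, PySem.Dict.get?_insert,
              PySem.Dict.contains, Prod.ext_iff]
    · simp only [pvVENDORS, List.mem_cons, List.not_mem_nil, or_false] at hv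
      simp only [pvCATEGORIES, List.mem_cons, List.not_mem_nil, or_false] at hc
      push_neg at hc
      obtain ⟨m1, m2, m3, m4⟩ := hc
      rcases hv with rfl | rfl | rfl | rfl | rfl <;>
        simp [pvG, pvVENDORS, pvCATEGORIES, PySem.Dict.ext_iff, PySem.Dict.getD_eq_get?_getD,
              PySem.Dict.get?_mk_cons, PySem.Dict.get?_insert, PySem.Dict.contains, Prod.ext_iff,
              Ne.symm m1, Ne.symm m2, Ne.symm m3, Ne.symm m4]
  · simp only [pvVENDORS, List.mem_cons, List.not_mem_nil, or_false] at hv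
    push_neg at hv
    obtain ⟨n1, n2, n3, n4, n5⟩ := hv
    have hnone : PySem.Dict.get? (pvG cnt) v = none := by
      simp [pvG, pvVENDORS, PySem.Dict.get?, Ne.symm n1, Ne.symm n2, Ne.symm n3, Ne.symm n4, Ne.symm n5]
    rw [hnone]
    apply PySem.Dict.ext
    simp [pvG, pvVENDORS, pvCATEGORIES, PySem.Dict.getD_eq_get?_getD, PySem.Dict.get?_insert,
          Prod.ext_iff, Ne.symm n1, Ne.symm n2, Ne.symm n3, Ne.symm n4, Ne.symm n5]

theorem pvFold_comm (rows : List (List (String × String))) (cnt : PySem.Dict (String × String) Int) :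
    rows.foldl pvStepA (pvG cnt) = pvG (rows.foldl pvStepB cnt) := by
  induction rows generalizing cnt with
  | nil => rfl
  | cons r rs ih =>
      have hstep : pvStepA (pvG cnt) r = pvG (pvStepB cnt r) :=
        pvStep_comm' cnt (PySem.Dict.getD (PySem.Dict.mk r) "vendor" "") (pvClassify r)
      simp only [List.foldl_cons, hstep, ih]

-- ===== VERDICT (by name: the statement is the Claim_ definition above) =====
theorem per_vendor_counts_spec : Claim_equal_per_vendor_counts := by
  intro rows _
  show per_vendor_counts rows = per_vendor_counts_alt rows
  have hA : per_vendor_counts rows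
      = (rows.foldl pvStepA (pvG PySem.Dict.empty)).items.map (fun p => (p.1, p.2.items)) := rfl
  rw [hA, pvFold_comm]
  rfl
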